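-- pv_equiv track=rewrite | github.com/prehensilecode/adventofcode | 2018/02/chksum.py | count_duplets
-- ===== SOURCE A (Python) =====
-- def count_duplets(idlist):
--     ndup = 0
--     for id in idlist:
--         s = set(list(id))
--         for e in s:
--             c = id.count(e)
--             if c == 2:
--                 ndup += 1
--                 break
--     return ndup
-- ===== SOURCE B (Python) =====
-- def count_duplets(idlist):
--     ndup = 0
--     for ident in idlist:
--         chars = sorted(ident)
--         run = 1
--         found = False
--         for i in range(1, len(chars)):
--             if chars[i] == chars[i - 1]:
--                 run += 1
--             else:
--                 if run == 2:
--                     found = True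
--                     break
--                 run = 1
--         if found or (chars and run == 2):
--             ndup += 1
--     return ndup
-- ===== Notes on version B (the rewrite author's own statement) =====
-- stated objective: alternative
-- what changed: Per id, B sorts the characters and does a single run-length scan over consecutive equal characters (counting the id when a run of length exactly 2 closes), instead of A's set construction plus a repeated str.count scan per distinct character.
import Mathlib
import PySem

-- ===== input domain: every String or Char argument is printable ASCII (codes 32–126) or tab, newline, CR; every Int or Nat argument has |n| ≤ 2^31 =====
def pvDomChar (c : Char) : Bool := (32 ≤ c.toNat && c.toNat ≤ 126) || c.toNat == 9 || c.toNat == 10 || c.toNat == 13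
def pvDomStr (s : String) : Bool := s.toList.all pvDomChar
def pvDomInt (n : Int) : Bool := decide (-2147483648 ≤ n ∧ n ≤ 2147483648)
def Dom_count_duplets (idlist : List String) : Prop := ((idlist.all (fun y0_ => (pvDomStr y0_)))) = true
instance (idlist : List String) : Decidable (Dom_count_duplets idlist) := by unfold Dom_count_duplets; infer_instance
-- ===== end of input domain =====

-- B replaces A's set-plus-repeated-.count scan per id by sort-then-run-length with early stop (objective: alternative).


-- ===== PORT A =====
-- inner 'for e in s: if id.count(e) == 2: ndup += 1; break' — returns whether the break fired
def anyDupA (idc : List Char) : List Char → Bool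
  | [] => false
  | e :: rest => if idc.count e == 2 then true else anyDupA idc rest

def count_duplets (idlist : List String) : Int :=
  idlist.foldl (fun ndup id =>
    if anyDupA id.toList (PySem.Set.ofList id.toList) then ndup + 1 else ndup) 0

-- ===== PORT B =====
-- run-length scan over the tail of the sorted char list, comparing each char to the previous one
def runScan (p : Char) (run : Nat) : List Char → Bool
  | [] => run == 2
  | c :: cs =>
      if c == p then runScan p (run + 1) cs
      else if run == 2 then true else runScan c 1 cs

def hasDupRun : List Char → Bool
  | [] => false
  | c :: cs => runScan c 1 cs

def count_duplets_alt (idlist : List String) : Int :=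
  idlist.foldl (fun ndup id =>
    if hasDupRun (PySem.List.sorted id.toList (fun x => x) false) then ndup + 1 else ndup) 0

-- ===== PRECONDITION & SPEC =====
def Spec_count_duplets (idlist : List String) (out : Int) : Prop := out = count_duplets_alt idlist
instance (idlist : List String) (out : Int) : Decidable (Spec_count_duplets idlist out) := by unfold Spec_count_duplets; infer_instance

-- ===== CLAIM (what is proved, stated in full; the proofs are below) =====
def Claim_equal_count_duplets : Prop := ∀ (idlist : List String), Dom_count_duplets idlist → Spec_count_duplets idlist (count_duplets idlist)

-- ===== LEMMAS AND PROOFS =====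

lemma anyDupA_spec (idc : List Char) (s : List Char) :
    anyDupA idc s = true ↔ ∃ c ∈ s, idc.count c = 2 := by
  induction s with
  | nil => simp [anyDupA]
  | cons e rest ih =>
    simp only [anyDupA]
    by_cases h : idc.count e = 2
    · simp [h]
    · simp only [beq_iff_eq, h, if_false, ih, List.mem_cons]
      constructor
      · rintro ⟨c, hc, h2⟩; exact ⟨c, Or.inr hc, h2⟩
      · rintro ⟨c, hc | hc, h2⟩
        · exact absurd (hc ▸ h2) h
        · exact ⟨c, hc, h2⟩

lemma runScan_spec (m : List Char) : ∀ (p : Char) (k : Nat),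
    m.Pairwise (· ≤ ·) → (∀ x ∈ m, p ≤ x) →
    (runScan p k m = true ↔ (k + m.count p = 2 ∨ ∃ c, c ≠ p ∧ m.count c = 2)) := by
  induction m with
  | nil =>
    intro p k _ _
    simp [runScan]
  | cons c cs ih =>
    intro p k hpw hle
    have hcs_pw : cs.Pairwise (· ≤ ·) := (List.pairwise_cons.mp hpw).2
    have hc_le : ∀ x ∈ cs, c ≤ x := (List.pairwise_cons.mp hpw).1
    by_cases hcp : c = p
    · subst hcp
      simp only [runScan, beq_self_eq_true, if_true]
      rw [ih c (k + 1) hcs_pw hc_le]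
      constructor
      · rintro (h | ⟨d, hd, h2⟩)
        · left; simp; omega
        · right; exact ⟨d, hd, by simpa [List.count_cons, Ne.symm hd] using h2⟩
      · rintro (h | ⟨d, hd, h2⟩)
        · left; simp at h ⊢; omega
        · right; refine ⟨d, hd, ?_⟩; simpa [List.count_cons, Ne.symm hd] using h2
    · have hpc : p < c := lt_of_le_of_ne (hle c (List.mem_cons_self)) (Ne.symm hcp)
      have hp_notin : p ∉ cs := fun hmem => absurd (hc_le p hmem) (not_le.mpr hpc)
      have hp_cnt : List.count p cs = 0 := List.count_eq_zero.mpr hp_notin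
      have hp_cnt' : List.count p (c :: cs) = 0 := by
        simp [hp_cnt, hcp]
      simp only [runScan, beq_iff_eq, hcp, if_false]
      by_cases hk : k = 2
      · simp [hk, hp_cnt']
      · rw [if_neg hk]
        rw [ih c 1 hcs_pw hc_le]
        rw [hp_cnt']
        constructor
        · rintro (h1 | ⟨d, hd, h2⟩)
          · right; refine ⟨c, hcp, ?_⟩
            simp; omega
          · right; refine ⟨d, ?_, ?_⟩
            · intro hdp; subst hdp; rw [hp_cnt] at h2; omega
            · simpa [List.count_cons, Ne.symm hd] using h2
        · rintro (h | ⟨d, hd, h2⟩)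
          · omega
          · by_cases hdc : d = c
            · subst hdc
              left; simp at h2; omega
            · right; refine ⟨d, hdc, ?_⟩
              simpa [List.count_cons, Ne.symm hdc] using h2

lemma hasDupRun_iff (l : List Char) :
    hasDupRun (PySem.List.sorted l (fun x => x) false) = true ↔ ∃ c, l.count c = 2 := by
  have hperm : (PySem.List.sorted l (fun x => x) false).Perm l := PySem.List.sorted_perm l _ _
  have hcnt : ∀ c, (PySem.List.sorted l (fun x => x) false).count c = l.count c :=
    fun c => hperm.count_eq c
  have hpw : (PySem.List.sorted l (fun x => x) false).Pairwise (fun a b => a ≤ b) :=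
    PySem.List.sorted_pairwise l _
  cases hm : PySem.List.sorted l (fun x => x) false with
  | nil =>
    have hl : l = [] := by
      have := hperm; rw [hm] at this; exact this.symm.eq_nil
    subst hl
    simp [hasDupRun]
  | cons c cs =>
    rw [hm] at hpw hcnt
    have hcs_pw : cs.Pairwise (· ≤ ·) := (List.pairwise_cons.mp hpw).2
    have hc_le : ∀ x ∈ cs, c ≤ x := (List.pairwise_cons.mp hpw).1
    simp only [hasDupRun]
    rw [runScan_spec cs c 1 hcs_pw hc_le]
    constructor
    · rintro (h | ⟨d, hd, h2⟩)
      · exact ⟨c, by rw [← hcnt c]; simp; omega⟩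
      · exact ⟨d, by rw [← hcnt d]; simp [Ne.symm hd, h2]⟩
    · rintro ⟨d, hd⟩
      rw [← hcnt d] at hd
      by_cases hdc : d = c
      · subst hdc; left; simp at hd; omega
      · right; refine ⟨d, hdc, ?_⟩
        simpa [List.count_cons, Ne.symm hdc] using hd


lemma perId (id : String) :
    anyDupA id.toList (PySem.Set.ofList id.toList) =
      hasDupRun (PySem.List.sorted id.toList (fun x => x) false) := by
  rw [Bool.eq_iff_iff, anyDupA_spec, hasDupRun_iff]
  constructor
  · rintro ⟨c, _, h2⟩; exact ⟨c, h2⟩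
  · rintro ⟨c, h2⟩
    refine ⟨c, ?_, h2⟩
    rw [PySem.Set.mem_ofList]
    exact List.count_pos_iff.mp (by omega)

-- ===== VERDICT (by name: the statement is the Claim_ definition above) =====
theorem count_duplets_spec : Claim_equal_count_duplets := by
  intro idlist _
  unfold Spec_count_duplets count_duplets count_duplets_alt
  congr 1
  funext ndup id
  rw [perId id]
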